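-- pv_equiv track=rewrite | github.com/neko32/tanulib_py | tanukilib/tlib/datautil/vector.py | discard_till
-- ===== SOURCE A (Python) =====
-- from typing import List, TypeVar, Optional
--
-- T = TypeVar('T')
--
-- def discard_till(v: List[T], key: T, discard_key_line: bool = False) -> List[T]:
--     """Discard list's items till key is found"""
--     newv = []
--     found = False
--     found_idx = -1
--     for idx, val in enumerate(v):
--         if not found and val == key:
--             found = True
--             found_idx = idx
--
--         if found:
--             if not discard_key_line and found_idx == idx:
--                 newv.append(val)
--             elif discard_key_line and found_idx == idx:
--                 pass
--             else:
--                 newv.append(val)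
--
--     return newv
-- ===== SOURCE B (Python) =====
-- def discard_till(v, key, discard_key_line=False):
--     """Discard list's items till key is found"""
--     if key not in v:
--         return []
--     i = v.index(key)
--     return v[i + 1:] if discard_key_line else v[i:]
-- ===== Notes on version B (the rewrite author's own statement) =====
-- stated objective: simpler
-- what changed: Replaces the found-flag scan that appends element by element with a locate-then-slice: `v.index(key)` plus a single slice `v[i:]`/`v[i+1:]`, guarded by `key not in v`.
import Mathlib
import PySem

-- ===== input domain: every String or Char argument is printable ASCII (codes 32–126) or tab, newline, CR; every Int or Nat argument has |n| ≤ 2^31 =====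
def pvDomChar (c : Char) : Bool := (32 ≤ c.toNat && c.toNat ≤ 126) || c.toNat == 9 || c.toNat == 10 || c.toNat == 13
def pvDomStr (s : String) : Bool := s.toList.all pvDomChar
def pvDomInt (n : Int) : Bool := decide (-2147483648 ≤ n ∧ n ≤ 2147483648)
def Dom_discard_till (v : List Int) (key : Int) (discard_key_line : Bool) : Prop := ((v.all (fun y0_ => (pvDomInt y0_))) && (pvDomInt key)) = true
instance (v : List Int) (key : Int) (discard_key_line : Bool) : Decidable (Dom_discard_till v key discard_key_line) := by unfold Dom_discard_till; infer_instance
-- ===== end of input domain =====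

-- B replaces A's found-flag scan that appends element by element with locate-then-slice (simpler).

-- ===== PORT A =====
-- state = (newv, found, found_idx), exactly A's loop
def discard_till_step (key : Int) (discard_key_line : Bool)
    (s : List Int × Bool × Int) (p : Int × Int) : List Int × Bool × Int :=
  let newv := s.1
  let found0 := s.2.1
  let found_idx0 := s.2.2
  let idx := p.1
  let val := p.2
  let found := if !found0 && val == key then true else found0
  let found_idx := if !found0 && val == key then idx else found_idx0
  if found then
    if !discard_key_line && found_idx == idx then (newv ++ [val], found, found_idx)
    else if discard_key_line && found_idx == idx then (newv, found, found_idx)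
    else (newv ++ [val], found, found_idx)
  else (newv, found, found_idx)

def discard_till (v : List Int) (key : Int) (discard_key_line : Bool) : List Int :=
  ((PySem.List.enumerate v 0).foldl (discard_till_step key discard_key_line) ([], false, -1)).1

-- ===== PORT B =====
def discard_till_alt (v : List Int) (key : Int) (discard_key_line : Bool) : List Int :=
  if ¬ (key ∈ v) then []
  else
    match PySem.List.index? v key with
    | none => []
    | some i =>
      if discard_key_line then PySem.List.slice v (some ((i : Int) + 1)) none
      else PySem.List.slice v (some (i : Int)) none

-- ===== PRECONDITION & SPEC =====
def Spec_discard_till (v : List Int) (key : Int) (discard_key_line : Bool) (out : List Int) : Prop := out = discard_till_alt v key discard_key_line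
instance (v : List Int) (key : Int) (discard_key_line : Bool) (out : List Int) : Decidable (Spec_discard_till v key discard_key_line out) := by unfold Spec_discard_till; infer_instance

-- ===== CLAIM (what is proved, stated in full; the proofs are below) =====
def Claim_equal_discard_till : Prop := ∀ (v : List Int) (key : Int) (discard_key_line : Bool), Dom_discard_till v key discard_key_line → Spec_discard_till v key discard_key_line (discard_till v key discard_key_line)

-- ===== LEMMAS AND PROOFS =====

-- once found, every remaining element is appended (found_idx is strictly below all remaining indices)
theorem discard_till_after (key : Int) (d : Bool) (xs : List Int) :
    ∀ (s fi : Int) (acc : List Int), fi < s →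
    ((PySem.List.enumerate xs s).foldl (discard_till_step key d) (acc, true, fi)).1 = acc ++ xs := by
  induction xs with
  | nil => intro s fi acc h; simp [PySem.List.enumerate_nil]
  | cons x xs ih =>
    intro s fi acc h
    rw [PySem.List.enumerate_cons, List.foldl_cons]
    have hne : (fi == s) = false := by simp [Int.ne_of_lt h]
    have hstep : discard_till_step key d (acc, true, fi) (s, x) = (acc ++ [x], true, fi) := by
      simp [discard_till_step, hne]
    rw [hstep, ih (s+1) fi (acc ++ [x]) (by omega)]
    simp

-- the fold computes: empty until key found, then drop (with/without the key element)
theorem discard_till_fold (key : Int) (d : Bool) (xs : List Int) :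
    ∀ (s : Int) (acc : List Int),
    ((PySem.List.enumerate xs s).foldl (discard_till_step key d) (acc, false, -1)).1 =
      acc ++ (match PySem.List.index? xs key with
              | none => []
              | some i => if d then xs.drop (i+1) else xs.drop i) := by
  induction xs with
  | nil => intro s acc; simp [PySem.List.enumerate_nil, PySem.List.index?]
  | cons x xs ih =>
    intro s acc
    rw [PySem.List.enumerate_cons, List.foldl_cons]
    by_cases hx : x = key
    · have hstep : discard_till_step key d (acc, false, -1) (s, x) =
          (if d then acc else acc ++ [x], true, s) := by
        by_cases hd : d <;> simp [discard_till_step, hd, hx]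
      rw [hstep, discard_till_after key d xs (s+1) s _ (by omega)]
      rw [hx, PySem.List.index?_cons_self]
      by_cases hd : d <;> simp [hd]
    · have hstep : discard_till_step key d (acc, false, -1) (s, x) = (acc, false, -1) := by
        simp [discard_till_step, hx]
      rw [hstep, ih (s+1) acc]
      rw [PySem.List.index?_cons_of_ne xs hx]
      cases h : PySem.List.index? xs key with
      | none => simp
      | some i => by_cases hd : d <;> simp [hd, List.drop_succ_cons]

theorem discard_till_spec : Claim_equal_discard_till := by
  intro v key d _
  unfold Spec_discard_till discard_till discard_till_alt
  rw [discard_till_fold]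
  by_cases hmem : key ∈ v
  · rw [if_neg (not_not_intro hmem)]
    cases h : PySem.List.index? v key with
    | none => rw [PySem.List.index?_eq_none_iff] at h; exact absurd hmem h
    | some i =>
      by_cases hd : d
      · simp only [hd, if_true]
        have : ((i : Int) + 1) = ((i + 1 : Nat) : Int) := by push_cast; ring
        rw [this, PySem.List.slice_from_natCast]
        simp
      · simp only [hd, PySem.List.slice_from_natCast]
        simp
  · have h : PySem.List.index? v key = none := (PySem.List.index?_eq_none_iff v key).mpr hmem
    rw [PySem.List.index?_eq_idxOf?] at h
    simp [h, hmem]
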